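-- pv_equiv track=rewrite | github.com/PaluchowskiMatthew/MachineLearning | Projects/project2/project_road_segmentation/image_modifiers.py | patch_range
-- ===== SOURCE A (Python) =====
-- def patch_range(w, h, w_translation, h_translation):
--     """(CUSTOM) Calculate valid patch range for translation of patches
--
--     Args:
--         w (int): width of patch
--         h (int): height of patch
--         w_translation (int): w translation of patch
--         h_translation (int): h translaion of patch
--
--     Returns:
--         ([], []):  2-tuple of lists containting pixel translations
--     """
--     h_range = [0] if h_translation <= 0 else list(range(0, h, h_translation))
--     minus_h_range = [ x * -1 for x in h_range]
--     h_range = list(set(h_range + minus_h_range)) # trick to remove duplicates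
--     h_range.sort()
--
--     w_range = [0] if w_translation <= 0 else list(range(0, h, h_translation))
--     minus_w_range = [ x * -1 for x in w_range]
--     w_range = list(set(w_range + minus_w_range)) # trick to remove duplicates
--     w_range.sort()
--
--     return h_range, w_range
-- ===== SOURCE B (Python) =====
-- def patch_range(w, h, w_translation, h_translation):
--     """Same result as A, built directly as one symmetric progression:
--     no set, no sort. (Reproduces A's use of h/h_translation for the w case.)"""
--     def _sym(flag, dim, step):
--         if flag <= 0:
--             return [0]
--         pos = range(0, dim, step)
--         if len(pos) == 0:
--             return []
--         m = abs(pos[-1])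
--         return list(range(-m, m + 1, abs(step)))
--     return _sym(h_translation, h, h_translation), _sym(w_translation, h, h_translation)
-- ===== Notes on version B (the rewrite author's own statement) =====
-- stated objective: simpler
-- what changed: B builds each symmetric offset list directly as one arithmetic progression range(-m, m+1, |step|) from the last positive offset, instead of A's negate-map, list+list, set-dedup and sort.
import Mathlib
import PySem

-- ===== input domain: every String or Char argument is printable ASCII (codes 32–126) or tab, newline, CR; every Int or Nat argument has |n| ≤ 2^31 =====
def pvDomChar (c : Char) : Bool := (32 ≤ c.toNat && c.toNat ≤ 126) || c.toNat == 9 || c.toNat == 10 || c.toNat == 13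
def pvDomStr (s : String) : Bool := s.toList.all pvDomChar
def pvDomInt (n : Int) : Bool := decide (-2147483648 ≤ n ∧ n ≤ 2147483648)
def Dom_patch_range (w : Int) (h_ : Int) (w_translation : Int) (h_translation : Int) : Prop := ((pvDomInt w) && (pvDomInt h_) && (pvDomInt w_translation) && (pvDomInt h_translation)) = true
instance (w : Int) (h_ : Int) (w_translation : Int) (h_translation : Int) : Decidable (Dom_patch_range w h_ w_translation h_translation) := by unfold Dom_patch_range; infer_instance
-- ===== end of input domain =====

-- B builds each symmetric offset list directly as one arithmetic progression
-- range(-m, m+1, |step|) from the last positive offset, instead of A's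
-- negate-map, concatenate, set-dedup and sort (objective: simpler).

-- ===== PORT A =====
def patch_range (w : Int) (h_ : Int) (w_translation : Int) (h_translation : Int) : List Int × List Int :=
  let h_range := if h_translation ≤ 0 then [(0 : Int)] else PySem.List.pyRange 0 h_ h_translation
  let minus_h_range := h_range.map (fun x => x * -1)
  let h_range := PySem.List.sorted (PySem.Set.ofList (h_range ++ minus_h_range)) (fun x => x)
  let w_range := if w_translation ≤ 0 then [(0 : Int)] else PySem.List.pyRange 0 h_ h_translation
  let minus_w_range := w_range.map (fun x => x * -1)
  let w_range := PySem.List.sorted (PySem.Set.ofList (w_range ++ minus_w_range)) (fun x => x)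
  (h_range, w_range)

-- ===== PORT B =====
def pvSym (flag : Int) (dim : Int) (step : Int) : List Int :=
  if flag ≤ 0 then [(0 : Int)]
  else
    let pos := PySem.List.pyRange 0 dim step
    match pos.getLast? with
    | none => []
    | some last => PySem.List.pyRange (-|last|) (|last| + 1) |step|

def patch_range_alt (w : Int) (h_ : Int) (w_translation : Int) (h_translation : Int) : List Int × List Int :=
  (pvSym h_translation h_ h_translation, pvSym w_translation h_ h_translation)

-- ===== PRECONDITION & SPEC =====
-- Pre_ excludes exactly the inputs with w_translation > 0 and h_translation = 0,
-- where Python A raises ValueError (range() arg 3 must not be zero); B raises there too.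
def Pre_patch_range (w : Int) (h_ : Int) (w_translation : Int) (h_translation : Int) : Prop :=
  w_translation ≤ 0 ∨ h_translation ≠ 0
instance (w : Int) (h_ : Int) (w_translation : Int) (h_translation : Int) : Decidable (Pre_patch_range w h_ w_translation h_translation) := by unfold Pre_patch_range; infer_instance

def pvWitness_patch_range : Int × Int × Int × Int := (4, 6, 2, 2)

def Spec_patch_range (w : Int) (h_ : Int) (w_translation : Int) (h_translation : Int) (out : List Int × List Int) : Prop := out = patch_range_alt w h_ w_translation h_translation
instance (w : Int) (h_ : Int) (w_translation : Int) (h_translation : Int) (out : List Int × List Int) : Decidable (Spec_patch_range w h_ w_translation h_translation out) := by unfold Spec_patch_range; infer_instance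

-- ===== CLAIM (what is proved, stated in full; the proofs are below) =====
def Claim_equal_patch_range : Prop := ∀ (w : Int) (h_ : Int) (w_translation : Int) (h_translation : Int), Dom_patch_range w h_ w_translation h_translation → Pre_patch_range w h_ w_translation h_translation → Spec_patch_range w h_ w_translation h_translation (patch_range w h_ w_translation h_translation)

-- ===== LEMMAS AND PROOFS =====

-- general positive-step range is strictly increasing
lemma pairwise_lt_pyRange_pos (a b : Int) {s : Int} (hs : 0 < s) :
    (PySem.List.pyRange a b s).Pairwise (· < ·) := by
  rw [PySem.List.pyRange_of_pos a b hs]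
  refine (List.pairwise_lt_range).map _ ?_
  intro k l hkl
  have : (k : Int) < (l : Int) := by exact_mod_cast hkl
  nlinarith

-- negative-step range from 0 is the negation (elementwise) of the mirrored positive-step range
lemma pyRange_neg_eq_map_neg (d : Int) {s : Int} (hs : s < 0) :
    PySem.List.pyRange 0 d s = (PySem.List.pyRange 0 (-d) (-s)).map (fun x => x * -1) := by
  have hs' : (0 : Int) < -s := by omega
  rw [PySem.List.pyRange_of_pos 0 (-d) hs']
  unfold PySem.List.pyRange
  rw [if_neg (show ¬ s = (0:Int) by omega)]
  rw [if_neg (show ¬ (0:Int) < s by omega)]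
  rw [List.map_map]
  have hcnt : (if d < 0 then ((0 - d + -s - 1) / -s).toNat else 0)
            = (if 0 < -d then ((-d - 0 + -s - 1) / -s).toNat else 0) := by
    by_cases hd : d < 0
    · rw [if_pos hd, if_pos (by omega : (0:Int) < -d)]
      norm_num
    · rw [if_neg hd, if_neg (by omega : ¬ (0:Int) < -d)]
  rw [hcnt]
  refine List.map_congr_left fun a _ => by simp

-- the core characterisation: A's "negate, union as a set, sort" over pyRange 0 d s
-- equals B's single progression from the last element, for any nonzero step
lemma sym_eq (d : Int) {s : Int} (hs : 0 < s) :
    PySem.List.sorted (PySem.Set.ofList (PySem.List.pyRange 0 d s ++ (PySem.List.pyRange 0 d s).map (fun x => x * -1))) (fun x => x)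
      = (match (PySem.List.pyRange 0 d s).getLast? with
         | none => []
         | some last => PySem.List.pyRange (-|last|) (|last| + 1) |s|) := by
  by_cases hd : 0 < d
  · -- nonempty range
    obtain ⟨q, hqdef⟩ : ∃ q, q = (d + s - 1) / s := ⟨_, rfl⟩
    have hediv : s * q + (d + s - 1) % s = d + s - 1 := by
      rw [hqdef]; exact Int.ediv_add_emod _ _
    have hmod0 : 0 ≤ (d + s - 1) % s := Int.emod_nonneg _ (by omega)
    have hmod1 : (d + s - 1) % s < s := Int.emod_lt_of_pos _ hs
    have hsq_ge : d ≤ s * q := by omega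
    have hsq_le : s * q ≤ d + s - 1 := by omega
    have hq1 : 1 ≤ q := by
      by_contra h
      have hq0 : q ≤ 0 := by omega
      nlinarith
    obtain ⟨m, hmdef⟩ : ∃ m, m = s * q - s := ⟨_, rfl⟩
    have hm0 : 0 ≤ m := by nlinarith
    have hmd : m < d := by omega
    have hdm : d ≤ m + s := by omega
    have hdvdm : s ∣ m := ⟨q - 1, by rw [hmdef]; ring⟩
    have hr : PySem.List.pyRange 0 d s
        = List.map (fun (k : Nat) => 0 + s * (k : Int)) (List.range q.toNat) := by
      rw [PySem.List.pyRange_of_pos 0 d hs, if_pos hd]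
      congr 1
      rw [show d - 0 + s - 1 = d + s - 1 from by ring, hqdef]
    have hqpos : 0 < q.toNat := by omega
    have hlast : (PySem.List.pyRange 0 d s).getLast? = some m := by
      rw [hr, List.getLast?_map]
      obtain ⟨n, hn⟩ : ∃ n, q.toNat = n + 1 := ⟨q.toNat - 1, by omega⟩
      rw [hn, List.range_succ, List.getLast?_concat]
      simp only [Option.map_some]
      congr 1
      have hn' : (n : Int) = q - 1 := by omega
      rw [hn', hmdef]; ring
    rw [hlast]
    have habs : |m| = m := abs_of_nonneg hm0
    have habss : |s| = s := abs_of_pos hs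
    simp only [habs, habss]
    -- sorted(set(..)) = the symmetric range, via perm + strict order
    apply PySem.List.sorted_eq_of_perm_of_pairwise_lt
    · -- permutation: same members, both nodup
      have hys_nodup : (PySem.List.pyRange (-m) (m + 1) s).Nodup :=
        (pairwise_lt_pyRange_pos _ _ hs).imp (fun h => ne_of_lt h)
      refine (List.perm_ext_iff_of_nodup hys_nodup (PySem.Set.nodup_ofList _)).mpr ?_
      intro x
      rw [PySem.List.mem_pyRange_iff_of_pos hs, PySem.Set.mem_ofList, List.mem_append, List.mem_map]
      constructor
      · rintro ⟨hx1, hx2, hx3⟩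
        have hdvdx : s ∣ x := by
          have h := dvd_sub hx3 hdvdm
          have e : x - -m - m = x := by ring
          rwa [e] at h
        by_cases hx0 : 0 ≤ x
        · left
          rw [PySem.List.mem_pyRange_iff_of_pos hs]
          exact ⟨hx0, by omega, by rwa [show x - 0 = x from by ring]⟩
        · right
          refine ⟨-x, ?_, by ring⟩
          rw [PySem.List.mem_pyRange_iff_of_pos hs]
          refine ⟨by omega, by omega, ?_⟩
          rw [show -x - 0 = -x from by ring]
          exact dvd_neg.mpr hdvdx
      · intro hx
        have key : ∀ y : Int, y ∈ PySem.List.pyRange 0 d s → 0 ≤ y ∧ y ≤ m ∧ s ∣ y := by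
          intro y hy
          rw [PySem.List.mem_pyRange_iff_of_pos hs] at hy
          obtain ⟨hy1, hy2, hy3⟩ := hy
          have hy3' : s ∣ y := by rwa [show y - 0 = y from by ring] at hy3
          refine ⟨hy1, ?_, hy3'⟩
          by_contra hgt
          have h1 : s ∣ y - m := dvd_sub hy3' hdvdm
          have h2 : s ≤ y - m := Int.le_of_dvd (by omega) h1
          omega
        rcases hx with hx | ⟨y, hy, hyx⟩
        · obtain ⟨h1, h2, h3⟩ := key x hx
          refine ⟨by omega, by omega, ?_⟩
          rw [show x - -m = x + m from by ring]
          exact dvd_add h3 hdvdm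
        · obtain ⟨h1, h2, h3⟩ := key y hy
          have hxy : x = -y := by omega
          subst hxy
          refine ⟨by omega, by omega, ?_⟩
          rw [show -y - -m = m - y from by ring]
          exact dvd_sub hdvdm h3
    · exact pairwise_lt_pyRange_pos _ _ hs
  · -- empty range: both sides are []
    have hr : PySem.List.pyRange 0 d s = [] := by
      rw [PySem.List.pyRange_of_pos 0 d hs, if_neg hd]
      simp
    rw [hr]
    rfl

-- nonzero (possibly negative) step: reduce the negative case to the positive one
lemma sym_eq_ne (d : Int) {s : Int} (hs : s ≠ 0) :
    PySem.List.sorted (PySem.Set.ofList (PySem.List.pyRange 0 d s ++ (PySem.List.pyRange 0 d s).map (fun x => x * -1))) (fun x => x)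
      = (match (PySem.List.pyRange 0 d s).getLast? with
         | none => []
         | some last => PySem.List.pyRange (-|last|) (|last| + 1) |s|) := by
  rcases lt_or_gt_of_ne hs with hneg | hpos
  · -- s < 0 : the union is the same set as for (-d, -s), and last is its negation
    have hs' : (0 : Int) < -s := by omega
    have hmap := pyRange_neg_eq_map_neg d hneg
    have hmm : ((PySem.List.pyRange 0 (-d) (-s)).map (fun x => x * -1)).map (fun x => x * -1)
        = PySem.List.pyRange 0 (-d) (-s) := by
      rw [List.map_map]
      have he : ((fun x : Int => x * -1) ∘ (fun x : Int => x * -1)) = id := by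
        funext x; simp
      rw [he, List.map_id]
    have hperm : (PySem.List.pyRange 0 d s ++ (PySem.List.pyRange 0 d s).map (fun x => x * -1)).Perm
        (PySem.List.pyRange 0 (-d) (-s) ++ (PySem.List.pyRange 0 (-d) (-s)).map (fun x => x * -1)) := by
      rw [hmap, hmm]
      exact List.perm_append_comm
    have hof : (PySem.Set.ofList (PySem.List.pyRange 0 (-d) (-s) ++ (PySem.List.pyRange 0 (-d) (-s)).map (fun x => x * -1))).Perm
        (PySem.Set.ofList (PySem.List.pyRange 0 d s ++ (PySem.List.pyRange 0 d s).map (fun x => x * -1))) := by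
      refine (List.perm_ext_iff_of_nodup (PySem.Set.nodup_ofList _) (PySem.Set.nodup_ofList _)).mpr ?_
      intro x
      rw [PySem.Set.mem_ofList, PySem.Set.mem_ofList]
      exact hperm.mem_iff.symm
    have hsame : PySem.List.sorted (PySem.Set.ofList (PySem.List.pyRange 0 d s ++ (PySem.List.pyRange 0 d s).map (fun x => x * -1))) (fun x => x)
        = PySem.List.sorted (PySem.Set.ofList (PySem.List.pyRange 0 (-d) (-s) ++ (PySem.List.pyRange 0 (-d) (-s)).map (fun x => x * -1))) (fun x => x) :=
      PySem.List.sorted_eq_of_perm_of_pairwise_lt _ _ _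
        ((PySem.List.sorted_perm _ _ false).trans hof)
        (PySem.List.sorted_ofList_pairwise_lt _)
    rw [hsame, sym_eq (-d) hs']
    rw [hmap, List.getLast?_map]
    cases hlast : (PySem.List.pyRange 0 (-d) (-s)).getLast? with
    | none => rfl
    | some last =>
      simp only [Option.map_some]
      simp [abs_neg]
  · exact sym_eq d hpos

-- the [0] base case of A's pipeline
lemma base_zero :
    PySem.List.sorted (PySem.Set.ofList ([(0 : Int)] ++ [(0 : Int)].map (fun x => x * -1))) (fun x => x) = [(0 : Int)] := by
  decide

-- ===== VERDICT (by name: the statement is the Claim_ definition above) =====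
theorem patch_range_spec : Claim_equal_patch_range := by
  intro w h_ wt ht _hDom hPre
  unfold Spec_patch_range patch_range patch_range_alt pvSym
  refine Prod.ext ?_ ?_
  · -- h component
    by_cases hht : ht ≤ 0
    · simp only [hht, if_pos]
      exact base_zero
    · simp only [hht, if_false]
      exact sym_eq_ne h_ (by omega)
  · -- w component
    by_cases hwt : wt ≤ 0
    · simp only [hwt, if_pos]
      exact base_zero
    · have hht : ht ≠ 0 := by
        rcases hPre with h | h
        · omega
        · exact h
      simp only [hwt, if_false]
      exact sym_eq_ne h_ hht
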